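-- pv_equiv track=rewrite | github.com/jjoshua2/arc_agi | dupes/dbc1a6ce_group-042/test_correct/1161.py | transform
-- ===== SOURCE A (Python) =====
-- def transform(grid: list[list[int]]) -> list[list[int]]:
--     if not grid or not grid[0]:
--         return []
--     rows = len(grid)
--     cols = len(grid[0])
--     output = [row[:] for row in grid]
--
--     # Horizontal fills: for each row, fill gaps between consecutive 1s
--     for r in range(rows):
--         one_cols = [c for c in range(cols) if grid[r][c] == 1]
--         if len(one_cols) < 2:
--             continue
--         one_cols.sort()
--         for i in range(len(one_cols) - 1):
--             start_c = one_cols[i] + 1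
--             end_c = one_cols[i + 1] - 1
--             for c in range(start_c, end_c + 1):
--                 output[r][c] = 8
--
--     # Vertical fills: for each column, fill gaps between consecutive 1s
--     for c in range(cols):
--         one_rows = [r for r in range(rows) if grid[r][c] == 1]
--         if len(one_rows) < 2:
--             continue
--         one_rows.sort()
--         for i in range(len(one_rows) - 1):
--             start_r = one_rows[i] + 1
--             end_r = one_rows[i + 1] - 1
--             for r in range(start_r, end_r + 1):
--                 output[r][c] = 8
--
--     return output
-- ===== SOURCE B (Python) =====
-- def transform(grid: list[list[int]]) -> list[list[int]]:
--     if not grid or not grid[0]: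
--         return []
--     rows = len(grid)
--     cols = len(grid[0])
--     # Horizontal: per row, one contiguous span from first to last 1 (built functionally)
--     out = []
--     for row in grid:
--         ones = [c for c in range(cols) if row[c] == 1]
--         if len(ones) < 2:
--             out.append(row[:])
--         else:
--             lo, hi = ones[0], ones[-1]
--             out.append([8 if lo <= c <= hi and row[c] != 1 else row[c]
--                         for c in range(len(row))])
--     # Vertical: per column, one span from first to last 1 (reading the ORIGINAL grid)
--     for c in range(cols):
--         one_rows = [r for r in range(rows) if grid[r][c] == 1]
--         if len(one_rows) < 2:
--             continue
--         for r in range(one_rows[0], one_rows[-1] + 1):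
--             if grid[r][c] != 1:
--                 out[r][c] = 8
--     return out
-- ===== Notes on version B (the rewrite author's own statement) =====
-- stated objective: simpler
-- what changed: A collects every 1-column (1-row), sorts, and loops over consecutive pairs filling each gap with an inner range loop; B instead fills one contiguous span per row/column from the first to the last 1, writing 8 at every non-1 cell of the span, and builds the row pass functionally instead of mutating a copy.
import Mathlib
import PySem

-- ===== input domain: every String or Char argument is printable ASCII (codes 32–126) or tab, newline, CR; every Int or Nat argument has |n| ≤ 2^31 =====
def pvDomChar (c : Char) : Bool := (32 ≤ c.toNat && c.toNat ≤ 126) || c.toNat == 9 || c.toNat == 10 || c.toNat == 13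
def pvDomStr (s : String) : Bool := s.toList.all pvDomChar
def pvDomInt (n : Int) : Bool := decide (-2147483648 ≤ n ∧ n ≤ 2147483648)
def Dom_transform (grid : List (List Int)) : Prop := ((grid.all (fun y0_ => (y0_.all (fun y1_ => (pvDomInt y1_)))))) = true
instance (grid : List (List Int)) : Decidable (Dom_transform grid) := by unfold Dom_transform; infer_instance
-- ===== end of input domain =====

-- B replaces A's collect-all-1-positions-then-fill-every-consecutive-pair structure by one
-- contiguous first-to-last span per row/column, writing 8 at non-1 cells of the span
-- (objective: simpler decomposition; same asymptotic cost).

-- ===== PORT A =====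
-- grid[r][c] (indices here are loop counters, always ≥ 0 in A)
def pvGet2 (g : List (List Int)) (r c : Nat) : Int := (g.getD r []).getD c 0
-- output[r][c] = v (in-place assignment; out-of-range never reached inside Pre_)
def pvSet2 (g : List (List Int)) (r c : Nat) (v : Int) : List (List Int) :=
  g.modify r (fun row => row.set c v)

-- for c in range(start_c, end_c + 1): output[r][c] = 8   (range(a+1, b+1-1) of nats = range' (a+1) (b-(a+1)))
def pvFillRowGap (r a b : Nat) (out : List (List Int)) : List (List Int) :=
  (List.range' (a+1) (b - (a+1))).foldl (fun o c => pvSet2 o r c 8) out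
-- for i in range(len(one_cols) - 1): … — the loop over consecutive pairs, as structural recursion
def pvFillRowPairs (r : Nat) : List Nat → List (List Int) → List (List Int)
  | a :: b :: rest, out => pvFillRowPairs r (b :: rest) (pvFillRowGap r a b out)
  | _, out => out
def pvFillColGap (c a b : Nat) (out : List (List Int)) : List (List Int) :=
  (List.range' (a+1) (b - (a+1))).foldl (fun o r => pvSet2 o r c 8) out
def pvFillColPairs (c : Nat) : List Nat → List (List Int) → List (List Int)
  | a :: b :: rest, out => pvFillColPairs c (b :: rest) (pvFillColGap c a b out)
  | _, out => out

def transform (grid : List (List Int)) : List (List Int) :=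
  if grid = [] then [] else
  if grid.headD [] = [] then [] else
  let rows := grid.length
  let cols := (grid.headD []).length
  let output := grid.map (fun row => row)   -- [row[:] for row in grid]
  let output1 := (List.range rows).foldl (fun out r =>
    let oneCols := (List.range cols).filter (fun c => pvGet2 grid r c == 1)
    if oneCols.length < 2 then out
    else pvFillRowPairs r (oneCols.mergeSort (fun a b => a ≤ b)) out) output
  (List.range cols).foldl (fun out c =>
    let oneRows := (List.range rows).filter (fun r => pvGet2 grid r c == 1)
    if oneRows.length < 2 then out
    else pvFillColPairs c (oneRows.mergeSort (fun a b => a ≤ b)) out) output1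

-- ===== PORT B =====
-- one row: 8 on the non-1 cells of the span from the first to the last 1
def pvRowSpan (cols : Nat) (row : List Int) : List Int :=
  let ones := (List.range cols).filter (fun c => row.getD c 0 == 1)
  if ones.length < 2 then row
  else
    let lo := ones.headD 0
    let hi := ones.getLastD 0
    (List.range row.length).map (fun c =>
      if lo ≤ c ∧ c ≤ hi ∧ row.getD c 0 ≠ 1 then 8 else row.getD c 0)
-- one column: write 8 at the non-1 cells of the span from the first to the last 1
def pvColFill (grid : List (List Int)) (rows c : Nat) (out : List (List Int)) : List (List Int) :=
  let ones := (List.range rows).filter (fun r => pvGet2 grid r c == 1)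
  if ones.length < 2 then out
  else (List.range' (ones.headD 0) (ones.getLastD 0 + 1 - ones.headD 0)).foldl
    (fun o r => if pvGet2 grid r c ≠ 1 then pvSet2 o r c 8 else o) out

def transform_alt (grid : List (List Int)) : List (List Int) :=
  if grid = [] then [] else
  if grid.headD [] = [] then [] else
  let rows := grid.length
  let cols := (grid.headD []).length
  (List.range cols).foldl (fun out c => pvColFill grid rows c out)
    (grid.map (fun row => pvRowSpan cols row))

-- ===== PRECONDITION & SPEC =====
-- A raises IndexError exactly when some row is shorter than the first row: Pre_ admits
-- every input on which A returns (empty grids, and grids whose rows all reach len(grid[0])).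
def Pre_transform (grid : List (List Int)) : Prop :=
  grid = [] ∨ grid.headD [] = [] ∨ ∀ row ∈ grid, (grid.headD []).length ≤ row.length
instance (grid : List (List Int)) : Decidable (Pre_transform grid) := by unfold Pre_transform; infer_instance
def pvWitness_transform : List (List Int) := [[1, 0, 1], [0, 0, 0], [1, 2, 1]]
def Spec_transform (grid : List (List Int)) (out : List (List Int)) : Prop := out = transform_alt grid
instance (grid : List (List Int)) (out : List (List Int)) : Decidable (Spec_transform grid out) := by unfold Spec_transform; infer_instance

-- ===== CLAIM (what is proved, stated in full; the proofs are below) =====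
def Claim_equal_transform : Prop := ∀ (grid : List (List Int)), Dom_transform grid → Pre_transform grid → Spec_transform grid (transform grid)

-- ===== LEMMAS AND PROOFS =====

-- write a batch of cells to 8
def pvWrites (ps : List (Nat × Nat)) (g : List (List Int)) : List (List Int) :=
  ps.foldl (fun o p => pvSet2 o p.1 p.2 8) g

-- the indices A's pairwise loop writes
def pvGaps : List Nat → List Nat
  | a :: b :: rest => List.range' (a+1) (b - (a+1)) ++ pvGaps (b :: rest)
  | _ => []

def pvOnesR (grid : List (List Int)) (r : Nat) : List Nat :=
  (List.range (grid.headD []).length).filter (fun c => pvGet2 grid r c == 1)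
def pvOnesC (grid : List (List Int)) (c : Nat) : List Nat :=
  (List.range grid.length).filter (fun r => pvGet2 grid r c == 1)

def pvHList (grid : List (List Int)) : List (Nat × Nat) :=
  (List.range grid.length).flatMap (fun r =>
    if (pvOnesR grid r).length < 2 then [] else (pvGaps (pvOnesR grid r)).map (fun c => (r, c)))
def pvVList (grid : List (List Int)) : List (Nat × Nat) :=
  (List.range (grid.headD []).length).flatMap (fun c =>
    if (pvOnesC grid c).length < 2 then [] else (pvGaps (pvOnesC grid c)).map (fun r => (r, c)))

-- the span conditions under which a cell is set to 8
def pvHcond (grid : List (List Int)) (r c : Nat) : Prop :=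
  2 ≤ (pvOnesR grid r).length ∧ (pvOnesR grid r).headD 0 ≤ c ∧
    c ≤ (pvOnesR grid r).getLastD 0 ∧ pvGet2 grid r c ≠ 1
def pvVcond (grid : List (List Int)) (r c : Nat) : Prop :=
  2 ≤ (pvOnesC grid c).length ∧ (pvOnesC grid c).headD 0 ≤ r ∧
    r ≤ (pvOnesC grid c).getLastD 0 ∧ pvGet2 grid r c ≠ 1

theorem pvSet2_length (g : List (List Int)) (r c : Nat) (v : Int) :
    (pvSet2 g r c v).length = g.length := by
  simp [pvSet2]

theorem pvSet2_row_length (g : List (List Int)) (r c : Nat) (v : Int) (r' : Nat) :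
    ((pvSet2 g r c v).getD r' []).length = (g.getD r' []).length := by
  simp only [pvSet2, List.getD_eq_getElem?_getD, List.getElem?_modify]
  cases h : g[r']? with
  | none => simp
  | some row => by_cases hr : r = r' <;> simp [hr]

theorem pvGet2_set2 (g : List (List Int)) (r c : Nat) (v : Int) (r' c' : Nat) :
    pvGet2 (pvSet2 g r c v) r' c' =
      if r = r' ∧ c = c' ∧ r < g.length ∧ c < (g.getD r []).length then v
      else pvGet2 g r' c' := by
  simp only [pvGet2, pvSet2, List.getD_eq_getElem?_getD, List.getElem?_modify]
  by_cases hr : r = r'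
  · subst hr
    cases h : g[r]? with
    | none =>
      have : ¬ r < g.length := by simpa [List.getElem?_eq_none_iff] using h
      simp [this]
    | some row =>
      have hlt : r < g.length := by
        have := List.getElem?_eq_some_iff.mp h; exact this.1
      by_cases hc : c = c'
      · subst hc
        by_cases hcl : c < row.length
        · simp [hlt, hcl]
        · simp [hlt, hcl, List.set_eq_of_length_le (Nat.le_of_not_lt hcl)]
      · simp [hc]
  · simp [hr]

theorem pvWrites_length (ps : List (Nat × Nat)) (g : List (List Int)) :
    (pvWrites ps g).length = g.length := by
  induction ps generalizing g with
  | nil => rfl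
  | cons p ps ih =>
      rw [show pvWrites (p :: ps) g = pvWrites ps (pvSet2 g p.1 p.2 8) from rfl,
        ih, pvSet2_length]

theorem pvWrites_row_length (ps : List (Nat × Nat)) (g : List (List Int)) (r : Nat) :
    ((pvWrites ps g).getD r []).length = (g.getD r []).length := by
  induction ps generalizing g with
  | nil => rfl
  | cons p ps ih =>
      rw [show pvWrites (p :: ps) g = pvWrites ps (pvSet2 g p.1 p.2 8) from rfl,
        ih, pvSet2_row_length]

theorem pvGetLastD_mem (x : Nat) (l : List Nat) : (x :: l).getLastD 0 ∈ x :: l := by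
  induction l generalizing x with
  | nil => simp
  | cons y l ih => simpa using Or.inr (ih y)

theorem pvGet2_writes (ps : List (Nat × Nat)) (g : List (List Int)) (r c : Nat) :
    pvGet2 (pvWrites ps g) r c =
      if (r, c) ∈ ps ∧ r < g.length ∧ c < (g.getD r []).length then 8
      else pvGet2 g r c := by
  induction ps generalizing g with
  | nil => simp [pvWrites]
  | cons p ps ih =>
    rw [show pvWrites (p :: ps) g = pvWrites ps (pvSet2 g p.1 p.2 8) from rfl, ih,
      pvSet2_length, pvSet2_row_length, pvGet2_set2]
    obtain ⟨p1, p2⟩ := p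
    by_cases hb : r < g.length ∧ c < (g.getD r []).length
    · by_cases hm : (r, c) ∈ ps
      · rw [if_pos ⟨hm, hb.1, hb.2⟩, if_pos ⟨List.mem_cons_of_mem _ hm, hb.1, hb.2⟩]
      · rw [if_neg (fun h => hm h.1)]
        by_cases hp : p1 = r ∧ p2 = c
        · obtain ⟨rfl, rfl⟩ := hp
          rw [if_pos ⟨rfl, rfl, hb.1, hb.2⟩, if_pos ⟨List.mem_cons_self, hb.1, hb.2⟩]
        · rw [if_neg (fun h => hp ⟨h.1, h.2.1⟩)]
          rw [if_neg (by
            rintro ⟨h1, h2, h3⟩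
            rcases List.mem_cons.mp h1 with he | hm'
            · injection he with e1 e2; exact hp ⟨e1.symm, e2.symm⟩
            · exact hm hm')]
    · rw [if_neg (by rintro ⟨_, h2, h3⟩; exact hb ⟨h2, h3⟩),
        if_neg (by rintro ⟨rfl, rfl, h3, h4⟩; exact hb ⟨h3, h4⟩),
        if_neg (by rintro ⟨_, h2, h3⟩; exact hb ⟨h2, h3⟩)]

theorem pvWrites_append (ps qs : List (Nat × Nat)) (g : List (List Int)) :
    pvWrites (ps ++ qs) g = pvWrites qs (pvWrites ps g) := by
  simp [pvWrites, List.foldl_append]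

theorem pvFoldl_writes_flatMap {α : Type} (xs : List α) (f : α → List (Nat × Nat)) (g : List (List Int)) :
    xs.foldl (fun o x => pvWrites (f x) o) g = pvWrites (xs.flatMap f) g := by
  induction xs generalizing g with
  | nil => rfl
  | cons x xs ih => simp [List.foldl_cons, List.flatMap_cons, pvWrites_append, ih]

theorem pvFillRowPairs_eq (r : Nat) (L : List Nat) (out : List (List Int)) :
    pvFillRowPairs r L out = pvWrites ((pvGaps L).map (fun c => (r, c))) out := by
  induction L generalizing out with
  | nil => rfl
  | cons a L ih =>
    cases L with
    | nil => rfl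
    | cons b rest =>
      rw [pvFillRowPairs, ih, pvGaps, List.map_append, pvWrites_append]
      congr 1
      simp [pvFillRowGap, pvWrites, List.foldl_map]

theorem pvFillColPairs_eq (c : Nat) (L : List Nat) (out : List (List Int)) :
    pvFillColPairs c L out = pvWrites ((pvGaps L).map (fun r => (r, c))) out := by
  induction L generalizing out with
  | nil => rfl
  | cons a L ih =>
    cases L with
    | nil => rfl
    | cons b rest =>
      rw [pvFillColPairs, ih, pvGaps, List.map_append, pvWrites_append]
      congr 1
      simp [pvFillColGap, pvWrites, List.foldl_map]

-- strictly between two consecutive elements iff inside the first-to-last span and not an element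
theorem pvMem_gaps (L : List Nat) (hL : L.Pairwise (· < ·)) (c : Nat) :
    c ∈ pvGaps L ↔ (L ≠ [] ∧ L.headD 0 ≤ c ∧ c ≤ L.getLastD 0 ∧ c ∉ L) := by
  induction L with
  | nil => simp [pvGaps]
  | cons a L ih =>
    cases L with
    | nil => simp [pvGaps]; omega
    | cons b rest =>
      have hab : a < b := (List.pairwise_cons.mp hL).1 b (by simp)
      have hball : ∀ x ∈ b :: rest, b ≤ x := by
        intro x hx
        rcases List.mem_cons.mp hx with h | h
        · omega
        · exact Nat.le_of_lt ((List.pairwise_cons.mp (List.pairwise_cons.mp hL).2).1 x h)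
      have hlast : b ≤ (b :: rest).getLastD 0 := hball _ (pvGetLastD_mem b rest)
      have hih := ih (List.pairwise_cons.mp hL).2
      rw [pvGaps, List.mem_append, hih]
      simp only [List.headD_cons, List.getLastD_cons, List.mem_cons, List.mem_range'_1,
        ne_eq, reduceCtorEq, not_false_eq_true, true_and] at *
      constructor
      · rintro (h | ⟨h1, h2, h3⟩)
        · refine ⟨by omega, by omega, ?_⟩
          push Not
          refine ⟨by omega, by omega, fun hm => ?_⟩
          have := hball c (Or.inr hm); omega
        · push Not at h3 ⊢
          exact ⟨by omega, h2, by omega, h3.1, h3.2⟩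
      · rintro ⟨h1, h2, h3⟩
        push Not at h3
        by_cases hcb : c < b
        · left; omega
        · right
          push Not
          exact ⟨by omega, h2, h3.2.1, h3.2.2⟩

theorem pvOnesR_sorted (grid : List (List Int)) (r : Nat) : (pvOnesR grid r).Pairwise (· < ·) :=
  List.pairwise_lt_range.filter _
theorem pvOnesC_sorted (grid : List (List Int)) (c : Nat) : (pvOnesC grid c).Pairwise (· < ·) :=
  List.pairwise_lt_range.filter _

theorem pvMem_onesR (grid : List (List Int)) (r x : Nat) :
    x ∈ pvOnesR grid r ↔ x < (grid.headD []).length ∧ pvGet2 grid r x = 1 := by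
  simp [pvOnesR, List.mem_filter, List.mem_range]
theorem pvMem_onesC (grid : List (List Int)) (c x : Nat) :
    x ∈ pvOnesC grid c ↔ x < grid.length ∧ pvGet2 grid x c = 1 := by
  simp [pvOnesC, List.mem_filter, List.mem_range]

-- head ≤ getLast for a sorted nonempty list
theorem pvHeadD_le_getLastD (L : List Nat) (hL : L.Pairwise (· < ·)) (hne : L ≠ []) :
    L.headD 0 ≤ L.getLastD 0 := by
  cases L with
  | nil => simp at hne
  | cons a l =>
    have : ∀ x ∈ a :: l, a ≤ x := by
      intro x hx
      rcases List.mem_cons.mp hx with h | h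
      · omega
      · exact Nat.le_of_lt ((List.pairwise_cons.mp hL).1 x h)
    simpa using this _ (pvGetLastD_mem a l)

theorem pvGetLastD_mem' (L : List Nat) (hne : L ≠ []) : L.getLastD 0 ∈ L := by
  cases L with
  | nil => simp at hne
  | cons a l => exact pvGetLastD_mem a l

theorem pvMem_hlist (grid : List (List Int)) (r c : Nat) :
    (r, c) ∈ pvHList grid ↔ r < grid.length ∧ pvHcond grid r c := by
  unfold pvHList pvHcond
  rw [List.mem_flatMap]
  constructor
  · rintro ⟨r', hr', hm⟩
    rw [List.mem_range] at hr'
    by_cases h2 : (pvOnesR grid r').length < 2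
    · simp [h2] at hm
    · rw [if_neg h2, List.mem_map] at hm
      obtain ⟨x, hx, he⟩ := hm
      injection he with e1 e2
      subst r'; subst x
      rw [pvMem_gaps _ (pvOnesR_sorted _ _)] at hx
      obtain ⟨hne, hlo, hhi, hnm⟩ := hx
      refine ⟨hr', Nat.not_lt.mp h2, hlo, hhi, fun hval => ?_⟩
      have hhiM := (pvMem_onesR grid r _).mp (pvGetLastD_mem' _ hne)
      exact hnm ((pvMem_onesR grid r c).mpr ⟨by omega, hval⟩)
  · rintro ⟨hr, h2, hlo, hhi, hv⟩
    refine ⟨r, List.mem_range.mpr hr, ?_⟩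
    rw [if_neg (by omega), List.mem_map]
    refine ⟨c, ?_, rfl⟩
    rw [pvMem_gaps _ (pvOnesR_sorted _ _)]
    exact ⟨by intro h; rw [h] at h2; simp at h2, hlo, hhi,
      fun hm => hv ((pvMem_onesR grid r c).mp hm).2⟩

theorem pvMem_vlist (grid : List (List Int)) (r c : Nat) :
    (r, c) ∈ pvVList grid ↔ c < (grid.headD []).length ∧ pvVcond grid r c := by
  unfold pvVList pvVcond
  rw [List.mem_flatMap]
  constructor
  · rintro ⟨c', hc', hm⟩
    rw [List.mem_range] at hc'
    by_cases h2 : (pvOnesC grid c').length < 2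
    · simp [h2] at hm
    · rw [if_neg h2, List.mem_map] at hm
      obtain ⟨x, hx, he⟩ := hm
      injection he with e1 e2
      subst c'; subst x
      rw [pvMem_gaps _ (pvOnesC_sorted _ _)] at hx
      obtain ⟨hne, hlo, hhi, hnm⟩ := hx
      refine ⟨hc', Nat.not_lt.mp h2, hlo, hhi, fun hval => ?_⟩
      have hhiM := (pvMem_onesC grid c _).mp (pvGetLastD_mem' _ hne)
      exact hnm ((pvMem_onesC grid c r).mpr ⟨by omega, hval⟩)
  · rintro ⟨hc, h2, hlo, hhi, hv⟩
    refine ⟨c, List.mem_range.mpr hc, ?_⟩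
    rw [if_neg (by omega), List.mem_map]
    refine ⟨r, ?_, rfl⟩
    rw [pvMem_gaps _ (pvOnesC_sorted _ _)]
    exact ⟨by intro h; rw [h] at h2; simp at h2, hlo, hhi,
      fun hm => hv ((pvMem_onesC grid c r).mp hm).2⟩

theorem transform_eq_writes (grid : List (List Int)) (h0 : ¬ grid = []) (h1 : ¬ grid.headD [] = []) :
    transform grid = pvWrites (pvVList grid) (pvWrites (pvHList grid) grid) := by
  have hH : (fun (out : List (List Int)) (r : Nat) =>
      let oneCols := (List.range (grid.headD []).length).filter (fun c => pvGet2 grid r c == 1)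
      if oneCols.length < 2 then out
      else pvFillRowPairs r (oneCols.mergeSort (fun a b => a ≤ b)) out)
      = fun out r => pvWrites (if (pvOnesR grid r).length < 2 then []
          else (pvGaps (pvOnesR grid r)).map (fun c => (r, c))) out := by
    funext out r
    show (if (pvOnesR grid r).length < 2 then out
      else pvFillRowPairs r ((pvOnesR grid r).mergeSort (fun a b => a ≤ b)) out) = _
    by_cases h2 : (pvOnesR grid r).length < 2
    · rw [if_pos h2, if_pos h2]; rfl
    · rw [if_neg h2, if_neg h2,
        List.mergeSort_eq_self LE.le ((pvOnesR_sorted grid r).imp Nat.le_of_lt),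
        pvFillRowPairs_eq]
  have hV : (fun (out : List (List Int)) (c : Nat) =>
      let oneRows := (List.range grid.length).filter (fun r => pvGet2 grid r c == 1)
      if oneRows.length < 2 then out
      else pvFillColPairs c (oneRows.mergeSort (fun a b => a ≤ b)) out)
      = fun out c => pvWrites (if (pvOnesC grid c).length < 2 then []
          else (pvGaps (pvOnesC grid c)).map (fun r => (r, c))) out := by
    funext out c
    show (if (pvOnesC grid c).length < 2 then out
      else pvFillColPairs c ((pvOnesC grid c).mergeSort (fun a b => a ≤ b)) out) = _
    by_cases h2 : (pvOnesC grid c).length < 2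
    · rw [if_pos h2, if_pos h2]; rfl
    · rw [if_neg h2, if_neg h2,
        List.mergeSort_eq_self LE.le ((pvOnesC_sorted grid c).imp Nat.le_of_lt),
        pvFillColPairs_eq]
  unfold transform
  rw [if_neg h0, if_neg h1]
  show (List.range (grid.headD []).length).foldl (fun (out : List (List Int)) (c : Nat) =>
      let oneRows := (List.range grid.length).filter (fun r => pvGet2 grid r c == 1)
      if oneRows.length < 2 then out
      else pvFillColPairs c (oneRows.mergeSort (fun a b => a ≤ b)) out)
      ((List.range grid.length).foldl (fun (out : List (List Int)) (r : Nat) =>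
        let oneCols := (List.range (grid.headD []).length).filter (fun c => pvGet2 grid r c == 1)
        if oneCols.length < 2 then out
        else pvFillRowPairs r (oneCols.mergeSort (fun a b => a ≤ b)) out)
        (grid.map (fun row => row))) = _
  rw [hH, hV, List.map_id', pvFoldl_writes_flatMap, pvFoldl_writes_flatMap]
  rfl

-- conditional single-column fold = one batch over the filtered list
theorem pvFoldlIf_eq (xs : List Nat) (P : Nat → Prop) [DecidablePred P] (c : Nat) (out : List (List Int)) :
    xs.foldl (fun o r => if P r then pvSet2 o r c 8 else o) out
      = pvWrites ((xs.filter (fun r => decide (P r))).map (fun r => (r, c))) out := by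
  induction xs generalizing out with
  | nil => rfl
  | cons x xs ih =>
    by_cases hx : P x
    · simp [List.foldl_cons, hx, ih]
      rfl
    · simp [List.foldl_cons, hx, ih]

-- B's vertical pass, as a batch list
def pvVListB (grid : List (List Int)) : List (Nat × Nat) :=
  (List.range (grid.headD []).length).flatMap (fun c =>
    if (pvOnesC grid c).length < 2 then []
    else ((List.range' ((pvOnesC grid c).headD 0)
        ((pvOnesC grid c).getLastD 0 + 1 - (pvOnesC grid c).headD 0)).filter
          (fun r => decide (pvGet2 grid r c ≠ 1))).map (fun r => (r, c)))

theorem pvMem_vlistB (grid : List (List Int)) (r c : Nat) :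
    (r, c) ∈ pvVListB grid ↔ c < (grid.headD []).length ∧ pvVcond grid r c := by
  unfold pvVListB pvVcond
  rw [List.mem_flatMap]
  constructor
  · rintro ⟨c', hc', hm⟩
    rw [List.mem_range] at hc'
    by_cases h2 : (pvOnesC grid c').length < 2
    · simp [h2] at hm
    · rw [if_neg h2, List.mem_map] at hm
      obtain ⟨x, hx, he⟩ := hm
      injection he with e1 e2
      subst c'; subst x
      rw [List.mem_filter, List.mem_range'_1] at hx
      obtain ⟨⟨hlo, hhi⟩, hv⟩ := hx
      have hle := pvHeadD_le_getLastD _ (pvOnesC_sorted grid c)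
        (by intro h; rw [h] at h2; simp at h2)
      exact ⟨hc', Nat.not_lt.mp h2, hlo, by omega, by simpa using hv⟩
  · rintro ⟨hc, h2, hlo, hhi, hv⟩
    refine ⟨c, List.mem_range.mpr hc, ?_⟩
    rw [if_neg (by omega), List.mem_map]
    have hle := pvHeadD_le_getLastD _ (pvOnesC_sorted grid c)
      (by intro h; rw [h] at h2; simp at h2)
    exact ⟨r, List.mem_filter.mpr ⟨List.mem_range'_1.mpr ⟨hlo, by omega⟩, by simpa using hv⟩, rfl⟩

theorem transform_alt_eq_writes (grid : List (List Int)) (h0 : ¬ grid = []) (h1 : ¬ grid.headD [] = []) :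
    transform_alt grid = pvWrites (pvVListB grid) (grid.map (fun row => pvRowSpan (grid.headD []).length row)) := by
  have hC : (fun (out : List (List Int)) (c : Nat) => pvColFill grid grid.length c out)
      = fun out c => pvWrites (if (pvOnesC grid c).length < 2 then []
          else ((List.range' ((pvOnesC grid c).headD 0)
            ((pvOnesC grid c).getLastD 0 + 1 - (pvOnesC grid c).headD 0)).filter
              (fun r => decide (pvGet2 grid r c ≠ 1))).map (fun r => (r, c))) out := by
    funext out c
    show (if (pvOnesC grid c).length < 2 then out
      else (List.range' ((pvOnesC grid c).headD 0)
        ((pvOnesC grid c).getLastD 0 + 1 - (pvOnesC grid c).headD 0)).foldl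
          (fun o r => if pvGet2 grid r c ≠ 1 then pvSet2 o r c 8 else o) out) = _
    by_cases h2 : (pvOnesC grid c).length < 2
    · rw [if_pos h2, if_pos h2]; rfl
    · rw [if_neg h2, if_neg h2, pvFoldlIf_eq]
  unfold transform_alt
  rw [if_neg h0, if_neg h1]
  show (List.range (grid.headD []).length).foldl
      (fun out c => pvColFill grid grid.length c out)
      (grid.map (fun row => pvRowSpan (grid.headD []).length row)) = _
  rw [hC, pvFoldl_writes_flatMap]
  rfl

-- cell value of B's horizontal pass
theorem pvRowSpan_cell (grid : List (List Int)) (r c : Nat)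
    (hr : r < grid.length) (hc : c < (grid.getD r []).length) :
    pvGet2 (grid.map (fun row => pvRowSpan (grid.headD []).length row)) r c
      = if 2 ≤ (pvOnesR grid r).length ∧ (pvOnesR grid r).headD 0 ≤ c ∧
          c ≤ (pvOnesR grid r).getLastD 0 ∧ pvGet2 grid r c ≠ 1 then 8
        else pvGet2 grid r c := by
  have hmap : (grid.map (fun row => pvRowSpan (grid.headD []).length row)).getD r []
      = pvRowSpan (grid.headD []).length (grid.getD r []) := by
    rw [List.getD_eq_getElem _ _ (by simpa using hr), List.getElem_map,
      List.getD_eq_getElem _ _ hr]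
  show ((grid.map (fun row => pvRowSpan (grid.headD []).length row)).getD r []).getD c 0 = _
  rw [hmap]
  simp only [pvRowSpan]
  have hones : (List.range (grid.headD []).length).filter
      (fun c => (grid.getD r []).getD c 0 == 1) = pvOnesR grid r := rfl
  rw [hones]
  by_cases h2 : (pvOnesR grid r).length < 2
  · rw [if_pos h2, if_neg (by omega)]
    rfl
  · rw [if_neg h2]
    have : ((List.range (grid.getD r []).length).map (fun c =>
        if (pvOnesR grid r).headD 0 ≤ c ∧ c ≤ (pvOnesR grid r).getLastD 0 ∧
          (grid.getD r []).getD c 0 ≠ 1 then (8 : Int) else (grid.getD r []).getD c 0)).getD c 0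
        = if (pvOnesR grid r).headD 0 ≤ c ∧ c ≤ (pvOnesR grid r).getLastD 0 ∧
            (grid.getD r []).getD c 0 ≠ 1 then (8 : Int) else (grid.getD r []).getD c 0 := by
      rw [List.getD_eq_getElem _ _ (by simpa using hc), List.getElem_map]
      simp
    rw [this]
    by_cases h3 : (pvOnesR grid r).headD 0 ≤ c ∧ c ≤ (pvOnesR grid r).getLastD 0 ∧
        (grid.getD r []).getD c 0 ≠ 1
    · rw [if_pos h3, if_pos (show 2 ≤ (pvOnesR grid r).length ∧ _ ∧ _ ∧ pvGet2 grid r c ≠ 1 from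
        ⟨by omega, h3.1, h3.2.1, h3.2.2⟩)]
    · rw [if_neg h3, if_neg (by rintro ⟨_, h1, h2, h4⟩; exact h3 ⟨h1, h2, h4⟩)]
      rfl


theorem pvRowSpan_length (cols : Nat) (row : List Int) : (pvRowSpan cols row).length = row.length := by
  simp only [pvRowSpan]
  split <;> simp

theorem pvGetElem_eq (g : List (List Int)) (r c : Nat) (hr : r < g.length) (hc : c < g[r].length) :
    g[r][c] = pvGet2 g r c := by
  rw [pvGet2, List.getD_eq_getElem _ _ hr, List.getD_eq_getElem _ _ hc]

-- ===== VERDICT (by name: the statement is the Claim_ definition above) =====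
theorem transform_spec : Claim_equal_transform := by
  intro grid _ _
  unfold Spec_transform
  by_cases h0 : grid = []
  · subst h0; rfl
  by_cases h1 : grid.headD [] = []
  · unfold transform transform_alt
    rw [if_neg h0, if_neg h0, if_pos h1, if_pos h1]
  rw [transform_eq_writes grid h0 h1, transform_alt_eq_writes grid h0 h1]
  have hmaplen : ∀ r', ((grid.map (fun row => pvRowSpan (grid.headD []).length row)).getD r' []).length
      = (grid.getD r' []).length := by
    intro r'
    by_cases h : r' < grid.length
    · rw [List.getD_eq_getElem _ _ (by simpa using h), List.getElem_map, pvRowSpan_length,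
        List.getD_eq_getElem _ _ h]
    · rw [List.getD_eq_default _ _ (by simpa using Nat.le_of_not_lt h),
        List.getD_eq_default _ _ (Nat.le_of_not_lt h)]
  have hlenA : (pvWrites (pvVList grid) (pvWrites (pvHList grid) grid)).length = grid.length := by
    rw [pvWrites_length, pvWrites_length]
  have hlenB : (pvWrites (pvVListB grid)
      (grid.map (fun row => pvRowSpan (grid.headD []).length row))).length = grid.length := by
    rw [pvWrites_length, List.length_map]
  have hrowlenA : ∀ r, ((pvWrites (pvVList grid) (pvWrites (pvHList grid) grid)).getD r []).length
      = (grid.getD r []).length := by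
    intro r; rw [pvWrites_row_length, pvWrites_row_length]
  have hrowlenB : ∀ r, ((pvWrites (pvVListB grid)
      (grid.map (fun row => pvRowSpan (grid.headD []).length row))).getD r []).length
      = (grid.getD r []).length := by
    intro r; rw [pvWrites_row_length, hmaplen]
  apply List.ext_getElem (by rw [hlenA, hlenB])
  intro r hA hB
  have hr : r < grid.length := by rwa [hlenA] at hA
  apply List.ext_getElem
  · rw [← List.getD_eq_getElem _ ([] : List Int) hA, ← List.getD_eq_getElem _ ([] : List Int) hB,
      hrowlenA, hrowlenB]
  intro c hc1 hc2
  have hcg : c < (grid.getD r []).length := by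
    rw [← List.getD_eq_getElem _ ([] : List Int) hA, hrowlenA] at hc1
    exact hc1
  rw [pvGetElem_eq _ _ _ hA hc1, pvGetElem_eq _ _ _ hB hc2]
  rw [pvGet2_writes (pvVList grid), pvGet2_writes (pvHList grid), pvGet2_writes (pvVListB grid)]
  rw [pvWrites_length, pvWrites_row_length, List.length_map, hmaplen]
  by_cases hv : (r, c) ∈ pvVList grid
  · have hvb : (r, c) ∈ pvVListB grid :=
      (pvMem_vlistB grid r c).mpr ((pvMem_vlist grid r c).mp hv)
    rw [if_pos (show (r, c) ∈ pvVList grid ∧ r < grid.length ∧ c < (grid.getD r []).length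
        from ⟨hv, hr, hcg⟩),
      if_pos (show (r, c) ∈ pvVListB grid ∧ r < grid.length ∧ c < (grid.getD r []).length
        from ⟨hvb, hr, hcg⟩)]
  · have hvb : (r, c) ∉ pvVListB grid := fun h =>
      hv ((pvMem_vlist grid r c).mpr ((pvMem_vlistB grid r c).mp h))
    rw [if_neg (show ¬((r, c) ∈ pvVList grid ∧ r < grid.length ∧ c < (grid.getD r []).length)
        from fun h => hv h.1),
      if_neg (show ¬((r, c) ∈ pvVListB grid ∧ r < grid.length ∧ c < (grid.getD r []).length)
        from fun h => hvb h.1),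
      pvRowSpan_cell grid r c hr hcg]
    by_cases hh : (r, c) ∈ pvHList grid
    · have hcond := ((pvMem_hlist grid r c).mp hh).2
      unfold pvHcond at hcond
      rw [if_pos (show (r, c) ∈ pvHList grid ∧ r < grid.length ∧ c < (grid.getD r []).length
        from ⟨hh, hr, hcg⟩), if_pos hcond]
    · rw [if_neg (show ¬((r, c) ∈ pvHList grid ∧ r < grid.length ∧ c < (grid.getD r []).length)
        from fun h => hh h.1),
        if_neg (show ¬(2 ≤ (pvOnesR grid r).length ∧ (pvOnesR grid r).headD 0 ≤ c ∧
            c ≤ (pvOnesR grid r).getLastD 0 ∧ pvGet2 grid r c ≠ 1)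
          from fun hcond => hh ((pvMem_hlist grid r c).mpr ⟨hr, hcond⟩))]
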